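-- pv_equiv track=rewrite | github.com/morganrmcconnon/SEP30 | old/Backend/utils.py | shared_keys
-- ===== SOURCE A (Python) =====
-- def shared_keys(dicts):
--     """
--     Given a list of dictionaries, return the keys that occur in all dictionaries, and all other keys.
--     """
--     if not dicts:
--         return []
--
--     # Create a dictionary to store key counts
--     key_counts = {}
--
--     # Count the occurrence of keys in each dictionary
--     for d in dicts:
--         for key in d.keys():
--             key_counts[key] = key_counts.get(key, 0) + 1
--
--     # Filter keys that occur in all dictionaries
--     common_keys = [key for key, count in key_counts.items() if count == len(dicts)]
--     non_common_keys = [key for key, count in key_counts.items() if count != len(dicts)]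
--
--     return common_keys, non_common_keys
-- ===== SOURCE B (Python) =====
-- def shared_keys(dicts):
--     """
--     Given a list of dictionaries, return the keys that occur in all dictionaries, and all other keys.
--     """
--     if not dicts:
--         return []
--
--     # Ordered list of distinct keys, in first-seen order across all dicts
--     ordered = []
--     seen = set()
--     for d in dicts:
--         for k in d:
--             if k not in seen:
--                 seen.add(k)
--                 ordered.append(k)
--
--     # Common keys as a running set intersection
--     common = set(dicts[0])
--     for d in dicts[1:]:
--         common &= d.keys()
--
--     return [k for k in ordered if k in common], [k for k in ordered if k not in common]
-- ===== Notes on version B (the rewrite author's own statement) =====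
-- stated objective: alternative
-- what changed: A counts each key's occurrences in one dict-of-counts and filters items by count == len(dicts); B instead builds a first-seen ordered list of distinct keys and computes the common keys as a running set intersection of the dicts' key views, then splits the ordered list by membership.
-- outside the precondition, e.g. on shared_keys([]): A returns (), B returns ()
import Mathlib
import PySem

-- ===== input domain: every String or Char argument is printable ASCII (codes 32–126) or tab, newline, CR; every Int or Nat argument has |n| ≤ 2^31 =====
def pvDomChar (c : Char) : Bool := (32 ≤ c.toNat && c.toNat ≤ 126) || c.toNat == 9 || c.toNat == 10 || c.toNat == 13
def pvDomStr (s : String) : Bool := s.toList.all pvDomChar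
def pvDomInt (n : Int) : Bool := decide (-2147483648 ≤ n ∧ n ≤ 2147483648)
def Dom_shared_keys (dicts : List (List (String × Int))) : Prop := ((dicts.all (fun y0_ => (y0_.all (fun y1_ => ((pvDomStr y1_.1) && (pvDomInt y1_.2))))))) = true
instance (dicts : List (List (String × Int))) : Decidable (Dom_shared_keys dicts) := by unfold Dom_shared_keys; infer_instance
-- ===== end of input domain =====

-- B replaces A's occurrence counter with a first-seen ordered key list plus a running
-- set intersection for the common keys (objective: alternative decomposition, same cost).

-- ===== PORT A =====
-- keys of the Python dict represented by the association list d: first occurrences, in order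
def pvKeysOf (d : List (String × Int)) : List String :=
  PySem.Set.ofList (d.map (·.1))

def shared_keys (dicts : List (List (String × Int))) : List String × List String :=
  -- key_counts: for d in dicts: for key in d.keys(): key_counts[key] = key_counts.get(key, 0) + 1
  let key_counts : PySem.Dict String Int :=
    dicts.foldl (fun kc d =>
      (pvKeysOf d).foldl (fun kc key => kc.insert key (kc.getD key 0 + 1)) kc)
      PySem.Dict.empty
  let n : Int := (dicts.length : Int)
  let common_keys := (key_counts.items.filter (fun p => p.2 == n)).map (·.1)
  let non_common_keys := (key_counts.items.filter (fun p => p.2 != n)).map (·.1)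
  (common_keys, non_common_keys)

-- ===== PORT B =====
def shared_keys_alt (dicts : List (List (String × Int))) : List String × List String :=
  -- ordered list of distinct keys in first-seen order, with a seen-set
  let st :=
    dicts.foldl (fun (st : PySem.Set String × List String) d =>
      (pvKeysOf d).foldl (fun st k =>
        if PySem.Set.contains st.1 k then st else (PySem.Set.add st.1 k, st.2 ++ [k])) st)
      (PySem.Set.empty, [])
  let ordered := st.2
  -- running set intersection of the key sets
  let common : PySem.Set String :=
    dicts.tail.foldl (fun c d => PySem.Set.inter c (pvKeysOf d))
      (PySem.Set.ofList ((dicts.headD []).map (·.1)))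
  (ordered.filter (fun k => PySem.Set.contains common k),
   ordered.filter (fun k => !PySem.Set.contains common k))

-- ===== PRECONDITION & SPEC =====
-- Pre_ excludes only the empty list, on which the Python A (and B) return the bare list []
-- instead of a pair of lists, which is not a value of the declared return type.
def Pre_shared_keys (dicts : List (List (String × Int))) : Prop := dicts ≠ []
instance (dicts : List (List (String × Int))) : Decidable (Pre_shared_keys dicts) := by unfold Pre_shared_keys; infer_instance
def pvWitness_shared_keys : (List (List (String × Int))) := [[("a", 1), ("b", 2)], [("a", 3)]]

def Spec_shared_keys (dicts : List (List (String × Int))) (out : List String × List String) : Prop := out = shared_keys_alt dicts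
instance (dicts : List (List (String × Int))) (out : List String × List String) : Decidable (Spec_shared_keys dicts out) := by unfold Spec_shared_keys; infer_instance

-- ===== CLAIM (what is proved, stated in full; the proofs are below) =====
def Claim_equal_shared_keys : Prop := ∀ (dicts : List (List (String × Int))), Dom_shared_keys dicts → Pre_shared_keys dicts → Spec_shared_keys dicts (shared_keys dicts)

-- ===== LEMMAS AND PROOFS =====

-- F: all dicts' key lists (first-occurrence order inside each dict), concatenated
def pvF (dicts : List (List (String × Int))) : List String :=
  (dicts.map pvKeysOf).flatten

lemma pv_sum_len (l : List Nat) (h : ∀ x ∈ l, x ≤ 1) : l.sum = l.length ↔ ∀ x ∈ l, x = 1 := by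
  induction l with
  | nil => simp
  | cons a t ih =>
    have ha := h a (by simp)
    have ih' := ih (fun x hx => h x (by simp [hx]))
    have hle : t.sum ≤ t.length := by
      have := List.sum_le_sum (l := t) (f := id) (g := fun _ => 1)
        (fun i hi => h i (by simp [hi]))
      simpa using this
    simp only [List.sum_cons, List.length_cons, List.mem_cons]
    constructor
    · intro he; have hc : a = 1 ∧ t.sum = t.length := by omega
      exact fun x hx => hx.elim (fun h => h ▸ hc.1) (fun h => ih'.mp hc.2 x h)
    · intro hall
      have h1 := ih'.mpr (fun x hx => hall x (.inr hx))
      have h2 := hall a (.inl rfl); omega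

lemma pv_mem_foldl_inter (l : List (List (String × Int))) (c : PySem.Set String)
    (g : List (String × Int) → PySem.Set String) (y : String) :
    y ∈ l.foldl (fun c d => PySem.Set.inter c (g d)) c ↔ y ∈ c ∧ ∀ d ∈ l, y ∈ g d := by
  induction l generalizing c with
  | nil => simp
  | cons a t ih =>
    simp only [List.foldl_cons, ih, PySem.Set.mem_inter, List.mem_cons]
    constructor
    · rintro ⟨⟨h1, h2⟩, h3⟩; exact ⟨h1, fun d hd => hd.elim (fun h => h ▸ h2) (h3 d)⟩
    · rintro ⟨h1, h2⟩; exact ⟨⟨h1, h2 a (.inl rfl)⟩, fun d hd => h2 d (.inr hd)⟩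

lemma pv_bfold (l : List String) (s : PySem.Set String) :
    l.foldl (fun (st : PySem.Set String × List String) k =>
      if PySem.Set.contains st.1 k then st else (PySem.Set.add st.1 k, st.2 ++ [k])) (s, s)
    = (PySem.Set.update s l, PySem.Set.update s l) := by
  induction l generalizing s with
  | nil => simp [PySem.Set.update]
  | cons a t ih =>
    simp only [List.foldl_cons, PySem.Set.update_cons]
    by_cases h : a ∈ s
    · rw [if_pos, PySem.Set.add_of_mem h]; exact ih s
      simpa [PySem.Set.contains_iff]
    · rw [if_neg, PySem.Set.add_of_not_mem h]
      · exact ih (s ++ [a])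
      · simpa [PySem.Set.contains_iff]

lemma pv_A_eq (dicts : List (List (String × Int))) :
    shared_keys dicts =
      ((PySem.Set.ofList (pvF dicts)).filter
          (fun k => (((pvF dicts).count k : Int) == (dicts.length : Int))),
       (PySem.Set.ofList (pvF dicts)).filter
          (fun k => !(((pvF dicts).count k : Int) == (dicts.length : Int)))) := by
  unfold shared_keys
  have hfold : dicts.foldl (fun kc d =>
        (pvKeysOf d).foldl (fun kc key => kc.insert key (kc.getD key 0 + 1)) kc)
        PySem.Dict.empty
      = PySem.Dict.counter (pvF dicts) := by
    rw [← PySem.Dict.foldl_insert_getD_add_one_eq_counter, pvF, List.foldl_flatten,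
      List.foldl_map]
  simp only [hfold, PySem.Dict.items_counter, List.filter_map, List.map_map]
  refine Prod.ext ?_ ?_ <;>
    · simp only [Function.comp_def, bne]
      rw [List.map_id']

lemma pv_B_eq (dicts : List (List (String × Int))) (d0 : List (String × Int))
    (rest : List (List (String × Int))) (hd : dicts = d0 :: rest) :
    shared_keys_alt dicts =
      ((PySem.Set.ofList (pvF dicts)).filter
          (fun k => PySem.Set.contains
            (rest.foldl (fun c d => PySem.Set.inter c (pvKeysOf d)) (pvKeysOf d0)) k),
       (PySem.Set.ofList (pvF dicts)).filter
          (fun k => !PySem.Set.contains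
            (rest.foldl (fun c d => PySem.Set.inter c (pvKeysOf d)) (pvKeysOf d0)) k)) := by
  subst hd
  unfold shared_keys_alt
  have hst : (d0 :: rest).foldl (fun (st : PySem.Set String × List String) d =>
        (pvKeysOf d).foldl (fun st k =>
          if PySem.Set.contains st.1 k then st else (PySem.Set.add st.1 k, st.2 ++ [k])) st)
        (PySem.Set.empty, [])
      = (PySem.Set.ofList (pvF (d0 :: rest)), PySem.Set.ofList (pvF (d0 :: rest))) := by
    rw [show ((PySem.Set.empty : PySem.Set String), ([] : List String))
          = (([] : PySem.Set String), ([] : List String)) from rfl,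
      ← List.foldl_map (f := pvKeysOf), ← List.foldl_flatten, ← pvF, pv_bfold,
      PySem.Set.update_nil_left]
  simp only [hst, List.headD_cons, List.tail_cons]
  rfl

-- for every key k: "k occurs in all dicts" read off the counter equals membership in the intersection
lemma pv_pred_eq (d0 : List (String × Int)) (rest : List (List (String × Int))) (k : String) :
    (((pvF (d0 :: rest)).count k : Int) == ((d0 :: rest).length : Int))
      = PySem.Set.contains
          (rest.foldl (fun c d => PySem.Set.inter c (pvKeysOf d)) (pvKeysOf d0)) k := by
  rw [Bool.eq_iff_iff, beq_iff_eq, PySem.Set.contains_iff, pv_mem_foldl_inter,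
    show (∀ d ∈ rest, k ∈ pvKeysOf d) = ∀ d ∈ rest, k ∈ pvKeysOf d from rfl]
  have hcount : (pvF (d0 :: rest)).count k
      = ((d0 :: rest).map (fun d => (pvKeysOf d).count k)).sum := by
    rw [pvF, List.count_flatten, List.map_map]; rfl
  have hle : ∀ x ∈ (d0 :: rest).map (fun d => (pvKeysOf d).count k), x ≤ 1 := by
    intro x hx
    simp only [List.mem_map] at hx
    obtain ⟨d, _, rfl⟩ := hx
    exact List.nodup_iff_count_le_one.mp (PySem.Set.nodup_ofList _) k
  constructor
  · intro h
    have h' : (pvF (d0 :: rest)).count k = (d0 :: rest).length := by exact_mod_cast h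
    rw [hcount, show ((d0 :: rest).length = ((d0 :: rest).map (fun d => (pvKeysOf d).count k)).length) from (List.length_map ..).symm] at h'
    have hall := (pv_sum_len _ hle).mp h'
    have hmem : ∀ d ∈ d0 :: rest, k ∈ pvKeysOf d := by
      intro d hdm
      have := hall ((pvKeysOf d).count k) (List.mem_map_of_mem hdm)
      exact List.count_pos_iff.mp (by omega)
    exact ⟨hmem d0 (.head _), fun d hdm => hmem d (.tail _ hdm)⟩
  · rintro ⟨h0, hr⟩
    have hall : ∀ x ∈ (d0 :: rest).map (fun d => (pvKeysOf d).count k), x = 1 := by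
      intro x hx
      simp only [List.mem_map, List.mem_cons] at hx
      obtain ⟨d, hdm, rfl⟩ := hx
      have hk : k ∈ pvKeysOf d := hdm.elim (fun h => h ▸ h0) (hr d)
      have h1 := List.count_pos_iff.mpr hk
      have h2 : (pvKeysOf d).count k ≤ 1 := by
        rw [pvKeysOf]
        exact List.nodup_iff_count_le_one.mp (PySem.Set.nodup_ofList (d.map (·.1))) k
      omega
    have := (pv_sum_len _ hle).mpr hall
    rw [hcount, this, List.length_map]


-- ===== VERDICT (by name: the statement is the Claim_ definition above) =====
theorem shared_keys_spec : Claim_equal_shared_keys := by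
  intro dicts _ hpre
  unfold Spec_shared_keys
  obtain ⟨d0, rest, rfl⟩ : ∃ d0 rest, dicts = d0 :: rest := by
    cases dicts with
    | nil => exact absurd rfl hpre
    | cons a t => exact ⟨a, t, rfl⟩
  rw [pv_A_eq, pv_B_eq _ d0 rest rfl]
  refine Prod.ext ?_ ?_ <;>
    · refine List.filter_congr ?_
      intro k _
      simp only [pv_pred_eq]
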